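-- pv_equiv track=rewrite | github.com/idmfrank/IdentityGuardian | identity_guardian/agents/risk_agent.py | _generate_remediation_steps
-- ===== SOURCE A (Python) =====
-- from typing import Dict, Any, List, Optional
--
-- def _generate_remediation_steps(risk_factors: List[Dict[str, Any]]) -> List[str]:
--     steps = []
--
--     if any(rf["type"] == "policy_violation" for rf in risk_factors):
--         steps.append("Review and remediate policy violations immediately")
--
--     if any(rf["type"] == "privileged_access" for rf in risk_factors):
--         steps.append("Conduct privileged access review and remove unnecessary admin rights")
--
--     if any(rf["type"] == "sensitive_data_access" for rf in risk_factors):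
--         steps.append("Verify business need for sensitive data access")
--
--     if any(rf["type"] == "behavioral_risk" for rf in risk_factors):
--         steps.append("Investigate recent user activity for anomalies")
--
--     steps.append("Schedule access review with user's manager")
--
--     return steps
-- ===== SOURCE B (Python) =====
-- _PRIORITY = {
--     "policy_violation": (0, "Review and remediate policy violations immediately"),
--     "privileged_access": (1, "Conduct privileged access review and remove unnecessary admin rights"),
--     "sensitive_data_access": (2, "Verify business need for sensitive data access"),
--     "behavioral_risk": (3, "Investigate recent user activity for anomalies"),
-- }
--
--
-- def _generate_remediation_steps(risk_factors):
--     # Single pass: build the remediation list incrementally by ordered insertion.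
--     steps = []  # (priority, message) pairs, kept sorted by priority, no duplicates
--     for rf in risk_factors:
--         entry = _PRIORITY.get(rf["type"])
--         if entry is not None and entry not in steps:
--             i = 0
--             while i < len(steps) and steps[i][0] < entry[0]:
--                 i += 1
--             steps.insert(i, entry)
--     return [msg for _, msg in steps] + ["Schedule access review with user's manager"]
-- ===== Notes on version B (the rewrite author's own statement) =====
-- stated objective: alternative
-- what changed: Replaces A's four staged any-scans over risk_factors (one per hard-coded type) with a single pass that builds the remediation list incrementally, inserting each newly seen type's message at its priority position (ordered insertion, no duplicates).
import Mathlib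
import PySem

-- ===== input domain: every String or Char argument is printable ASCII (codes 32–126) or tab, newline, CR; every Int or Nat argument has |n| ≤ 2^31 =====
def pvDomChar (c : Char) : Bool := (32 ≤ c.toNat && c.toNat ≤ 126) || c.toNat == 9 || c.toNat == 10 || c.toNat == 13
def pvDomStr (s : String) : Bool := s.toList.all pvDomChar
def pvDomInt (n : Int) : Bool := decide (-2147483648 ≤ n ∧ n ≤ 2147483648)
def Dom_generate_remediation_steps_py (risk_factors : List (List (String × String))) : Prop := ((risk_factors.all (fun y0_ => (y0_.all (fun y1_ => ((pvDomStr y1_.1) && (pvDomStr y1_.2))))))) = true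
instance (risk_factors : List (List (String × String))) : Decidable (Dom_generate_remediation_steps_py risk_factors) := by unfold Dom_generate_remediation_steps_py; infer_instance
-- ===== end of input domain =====

-- B replaces A's four staged any-scans with a single pass that builds the remediation list
-- incrementally by ordered (priority) insertion of newly seen types (objective: alternative).

-- rf["type"] as first-match association-list lookup (shared lookup primitive for both ports)
def lookupType (rf : List (String × String)) : Option String :=
  (rf.find? (fun p => p.1 == "type")).map (·.2)

-- ===== PORT A =====
def generate_remediation_steps_py (risk_factors : List (List (String × String))) : List String :=
  let steps : List String := []
  let steps := if risk_factors.any (fun rf => lookupType rf == some "policy_violation") then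
    steps ++ ["Review and remediate policy violations immediately"] else steps
  let steps := if risk_factors.any (fun rf => lookupType rf == some "privileged_access") then
    steps ++ ["Conduct privileged access review and remove unnecessary admin rights"] else steps
  let steps := if risk_factors.any (fun rf => lookupType rf == some "sensitive_data_access") then
    steps ++ ["Verify business need for sensitive data access"] else steps
  let steps := if risk_factors.any (fun rf => lookupType rf == some "behavioral_risk") then
    steps ++ ["Investigate recent user activity for anomalies"] else steps
  steps ++ ["Schedule access review with user's manager"]

-- ===== PORT B =====
-- _PRIORITY: type -> (priority, message)
def prioGet (t : String) : Option (Int × String) :=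
  (([("policy_violation", ((0 : Int), "Review and remediate policy violations immediately")),
     ("privileged_access", ((1 : Int), "Conduct privileged access review and remove unnecessary admin rights")),
     ("sensitive_data_access", ((2 : Int), "Verify business need for sensitive data access")),
     ("behavioral_risk", ((3 : Int), "Investigate recent user activity for anomalies"))] :
      List (String × (Int × String))).find? (fun p => p.1 == t)).map (·.2)

-- the inner while-loop + insert: insert e before the first element whose priority is not < e's
def insertByPrio (e : Int × String) : List (Int × String) → List (Int × String)
  | [] => [e]
  | x :: xs => if x.1 < e.1 then x :: insertByPrio e xs else e :: x :: xs

-- one iteration of B's for-loop (rf lacking "type" raises in Python; such inputs are outside Pre_)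
def stepB (steps : List (Int × String)) (rf : List (String × String)) : List (Int × String) :=
  match lookupType rf with
  | none => steps
  | some t =>
    match prioGet t with
    | none => steps
    | some e => if steps.contains e then steps else insertByPrio e steps

def generate_remediation_steps_py_alt (risk_factors : List (List (String × String))) : List String :=
  ((risk_factors.foldl stepB []).map (·.2)) ++ ["Schedule access review with user's manager"]

-- ===== PRECONDITION & SPEC =====
-- Pre_ excludes lists containing a type-less entry: there Python A usually raises KeyError, and on
-- the rare such inputs where A's short-circuiting any-scans never reach that entry and still return,
-- B (which reads every entry's "type") raises KeyError.
def Pre_generate_remediation_steps_py (risk_factors : List (List (String × String))) : Prop :=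
  (risk_factors.all (fun rf => rf.any (fun p => p.1 == "type"))) = true
instance (risk_factors : List (List (String × String))) : Decidable (Pre_generate_remediation_steps_py risk_factors) := by unfold Pre_generate_remediation_steps_py; infer_instance

def pvWitness_generate_remediation_steps_py : (List (List (String × String))) :=
  [[("type", "policy_violation")], [("type", "none")]]

def Spec_generate_remediation_steps_py (risk_factors : List (List (String × String))) (out : List String) : Prop := out = generate_remediation_steps_py_alt risk_factors
instance (risk_factors : List (List (String × String))) (out : List String) : Decidable (Spec_generate_remediation_steps_py risk_factors out) := by unfold Spec_generate_remediation_steps_py; infer_instance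

-- ===== CLAIM (what is proved, stated in full; the proofs are below) =====
def Claim_equal_generate_remediation_steps_py : Prop := ∀ (risk_factors : List (List (String × String))), Dom_generate_remediation_steps_py risk_factors → Pre_generate_remediation_steps_py risk_factors → Spec_generate_remediation_steps_py risk_factors (generate_remediation_steps_py risk_factors)

-- ===== LEMMAS AND PROOFS =====

-- the canonical sorted accumulator determined by which of the four types have been seen
def canon (b1 b2 b3 b4 : Bool) : List (Int × String) :=
  (if b1 then [((0 : Int), "Review and remediate policy violations immediately")] else []) ++
  (if b2 then [((1 : Int), "Conduct privileged access review and remove unnecessary admin rights")] else []) ++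
  (if b3 then [((2 : Int), "Verify business need for sensitive data access")] else []) ++
  (if b4 then [((3 : Int), "Investigate recent user activity for anomalies")] else [])

lemma stepB_canon (b1 b2 b3 b4 : Bool) (rf : List (String × String)) :
    stepB (canon b1 b2 b3 b4) rf =
    canon (b1 || (lookupType rf == some "policy_violation"))
          (b2 || (lookupType rf == some "privileged_access"))
          (b3 || (lookupType rf == some "sensitive_data_access"))
          (b4 || (lookupType rf == some "behavioral_risk")) := by
  unfold stepB
  cases h : lookupType rf with
  | none => simp
  | some t =>
    by_cases h1 : t = "policy_violation"
    · subst h1; cases b1 <;> cases b2 <;> cases b3 <;> cases b4 <;> decide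
    · by_cases h2 : t = "privileged_access"
      · subst h2; cases b1 <;> cases b2 <;> cases b3 <;> cases b4 <;> decide
      · by_cases h3 : t = "sensitive_data_access"
        · subst h3; cases b1 <;> cases b2 <;> cases b3 <;> cases b4 <;> decide
        · by_cases h4 : t = "behavioral_risk"
          · subst h4; cases b1 <;> cases b2 <;> cases b3 <;> cases b4 <;> decide
          · have hnone : prioGet t = none := by
              simp only [prioGet, List.find?,
                beq_eq_false_iff_ne.mpr (Ne.symm h1), beq_eq_false_iff_ne.mpr (Ne.symm h2),
                beq_eq_false_iff_ne.mpr (Ne.symm h3), beq_eq_false_iff_ne.mpr (Ne.symm h4)]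
              rfl
            simp [hnone, beq_eq_false_iff_ne.mpr h1, beq_eq_false_iff_ne.mpr h2,
              beq_eq_false_iff_ne.mpr h3, beq_eq_false_iff_ne.mpr h4]

lemma foldl_stepB_canon (L : List (List (String × String))) (b1 b2 b3 b4 : Bool) :
    L.foldl stepB (canon b1 b2 b3 b4) =
    canon (b1 || L.any (fun rf => lookupType rf == some "policy_violation"))
          (b2 || L.any (fun rf => lookupType rf == some "privileged_access"))
          (b3 || L.any (fun rf => lookupType rf == some "sensitive_data_access"))
          (b4 || L.any (fun rf => lookupType rf == some "behavioral_risk")) := by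
  induction L generalizing b1 b2 b3 b4 with
  | nil => simp
  | cons rf L ih =>
    simp only [List.foldl_cons, stepB_canon, ih, List.any_cons, Bool.or_assoc]

theorem generate_remediation_steps_py_spec : Claim_equal_generate_remediation_steps_py := by
  intro rfs _ _
  show generate_remediation_steps_py rfs = generate_remediation_steps_py_alt rfs
  have h0 : ([] : List (Int × String)) = canon false false false false := rfl
  simp only [generate_remediation_steps_py, generate_remediation_steps_py_alt, h0,
    foldl_stepB_canon, Bool.false_or]
  cases rfs.any (fun rf => lookupType rf == some "policy_violation") <;>
  cases rfs.any (fun rf => lookupType rf == some "privileged_access") <;>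
  cases rfs.any (fun rf => lookupType rf == some "sensitive_data_access") <;>
  cases rfs.any (fun rf => lookupType rf == some "behavioral_risk") <;>
  rfl
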